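-- pv_equiv track=rewrite | github.com/gridvisi/Python_workspace | Zero 2 Hero Class/Recursion_loop_comp/jan129adv.py | collatzDistance
-- ===== SOURCE A (Python) =====
-- def collatzDistance(r, n=1):
--     if r == 0:
--         return 1
--     else:
--         if n > 4 and n % 6 == 4:
--             return collatzDistance(r-1,2*n) + collatzDistance(r-1,(n-1)//3)
--         else:
--             return collatzDistance(r-1,2*n)
-- ===== SOURCE B (Python) =====
-- def collatzDistance(r, n=1):
--     frontier = [n]
--     for _ in range(r):
--         nxt = []
--         for m in frontier:
--             nxt.append(2 * m)
--             if m > 4 and m % 6 == 4: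
--                 nxt.append((m - 1) // 3)
--         frontier = nxt
--     return len(frontier)
-- ===== Notes on version B (the rewrite author's own statement) =====
-- stated objective: alternative
-- what changed: Replaces the recursive tree traversal with an iterative level-by-level frontier expansion: keep the list of live node values, expand it r times, return its length.
import Mathlib
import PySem

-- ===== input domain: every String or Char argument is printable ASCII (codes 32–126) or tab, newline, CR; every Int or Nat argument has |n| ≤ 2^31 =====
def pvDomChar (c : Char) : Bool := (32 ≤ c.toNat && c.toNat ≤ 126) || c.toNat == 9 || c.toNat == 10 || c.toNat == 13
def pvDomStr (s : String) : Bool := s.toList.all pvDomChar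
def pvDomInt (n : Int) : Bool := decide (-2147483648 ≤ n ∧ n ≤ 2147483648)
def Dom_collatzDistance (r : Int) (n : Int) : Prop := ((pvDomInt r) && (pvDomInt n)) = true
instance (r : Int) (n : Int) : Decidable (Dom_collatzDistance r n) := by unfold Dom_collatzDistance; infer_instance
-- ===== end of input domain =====

-- B replaces A's recursive tree traversal with an iterative frontier expansion (same exponential cost, different decomposition).


-- ===== PORT A =====
-- recursion on r, realised with fuel r.toNat; for r < 0 Python diverges (excluded by Pre_)
def collatzGo : Nat → Int → Int
  | 0, _ => 1
  | k + 1, n =>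
    if n > 4 ∧ PySem.Int.mod n 6 = 4 then
      collatzGo k (2 * n) + collatzGo k (PySem.Int.floordiv (n - 1) 3)
    else
      collatzGo k (2 * n)

def collatzDistance (r : Int) (n : Int) : Int := collatzGo r.toNat n

-- ===== PORT B =====
-- one frontier element m contributes 2*m, plus (m-1)//3 when m > 4 and m % 6 == 4
def collatzChildren (m : Int) : List Int :=
  if m > 4 ∧ PySem.Int.mod m 6 = 4 then [2 * m, PySem.Int.floordiv (m - 1) 3] else [2 * m]

def collatzFrontier : Nat → List Int → List Int
  | 0, L => L
  | k + 1, L => collatzFrontier k (L.flatMap collatzChildren)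

def collatzDistance_alt (r : Int) (n : Int) : Int := (collatzFrontier r.toNat [n]).length

-- ===== PRECONDITION & SPEC =====
-- Pre_ excludes r < 0, on which Python A recurses without a base case and raises RecursionError.
def Pre_collatzDistance (r : Int) (n : Int) : Prop := 0 ≤ r
instance (r : Int) (n : Int) : Decidable (Pre_collatzDistance r n) := by unfold Pre_collatzDistance; infer_instance
def pvWitness_collatzDistance : Int × Int := (6, 1)

def Spec_collatzDistance (r : Int) (n : Int) (out : Int) : Prop := out = collatzDistance_alt r n
instance (r : Int) (n : Int) (out : Int) : Decidable (Spec_collatzDistance r n out) := by unfold Spec_collatzDistance; infer_instance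

-- ===== CLAIM (what is proved, stated in full; the proofs are below) =====
def Claim_equal_collatzDistance : Prop := ∀ (r : Int) (n : Int), Dom_collatzDistance r n → Pre_collatzDistance r n → Spec_collatzDistance r n (collatzDistance r n)
-- ===== LEMMAS AND PROOFS =====
-- the frontier's length equals the sum, over its elements, of A's recursive count
theorem frontier_length (k : Nat) : ∀ (L : List Int),
    ((collatzFrontier k L).length : Int) = (L.map (collatzGo k)).sum := by
  induction k with
  | zero =>
    intro L
    induction L with
    | nil => simp [collatzFrontier]
    | cons m L ih =>
      simp_all [collatzFrontier, collatzGo]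
      omega
  | succ k ih =>
    intro L
    show ((collatzFrontier k (L.flatMap collatzChildren)).length : Int) = _
    rw [ih]
    induction L with
    | nil => simp
    | cons m L ihL =>
      simp only [List.flatMap_cons, List.map_append, List.sum_append, ihL, List.map_cons,
        List.sum_cons]
      congr 1
      simp only [collatzChildren, collatzGo]
      split <;> simp

theorem collatzDistance_spec : Claim_equal_collatzDistance := by
  intro r n _ _
  show collatzDistance r n = collatzDistance_alt r n
  rw [collatzDistance, collatzDistance_alt, frontier_length]
  simp
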